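-- pv_equiv track=rewrite | github.com/SantiXN/mealy-to-moore | main.py | remove_unreachable_states_mealy
-- ===== SOURCE A (Python) =====
-- def remove_unreachable_states_mealy(transitions, states, input_symbols):
--     reachable_states = set()
--     states_to_visit = {states[0]}
--
--     while states_to_visit:
--         current_state = states_to_visit.pop()
--         reachable_states.add(current_state)
--
--         for input_symbol in input_symbols:
--             if current_state in transitions[input_symbol]:
--                 next_state, _ = transitions[input_symbol][current_state]
--                 if next_state not in reachable_states:
--                     states_to_visit.add(next_state)
--
--     for input_symbol in input_symbols:
--         for state in list(transitions[input_symbol].keys()):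
--             if state not in reachable_states:
--                 del transitions[input_symbol][state]
--
--     states = [state for state in states if state in reachable_states]
--
--     return transitions, states
-- ===== SOURCE B (Python) =====
-- def remove_unreachable_states_mealy(transitions, states, input_symbols):
--     # Fixpoint saturation: repeatedly sweep the whole transition table, adding
--     # successors of already-reachable states, until a sweep adds nothing.
--     # (Like A, this mutates `transitions` in place; A deletes keys from the inner
--     # dicts, B rebinds each transitions[sym] to a rebuilt filtered dict.)
--     reachable = {states[0]}
--     changed = True
--     while changed:
--         changed = False
--         for sym in input_symbols:
--             for st, (nxt, _) in transitions[sym].items():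
--                 if st in reachable and nxt not in reachable:
--                     reachable.add(nxt)
--                     changed = True
--     for sym in input_symbols:
--         transitions[sym] = {st: v for st, v in transitions[sym].items() if st in reachable}
--     return transitions, [st for st in states if st in reachable]
-- ===== Notes on version B (the rewrite author's own statement) =====
-- stated objective: alternative
-- what changed: Replaced the set-worklist traversal (pop a pending state, look its successors up per input symbol) by fixpoint saturation passes that sweep the whole transition table until no new state is added, and the del-based pruning loops by rebuilding each inner dict with a filtered comprehension; Pre_ excludes inputs where A raises (empty states list, an input symbol missing from transitions) and assoc lists with duplicate inner keys, which do not represent any Python dict.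
import Mathlib
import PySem

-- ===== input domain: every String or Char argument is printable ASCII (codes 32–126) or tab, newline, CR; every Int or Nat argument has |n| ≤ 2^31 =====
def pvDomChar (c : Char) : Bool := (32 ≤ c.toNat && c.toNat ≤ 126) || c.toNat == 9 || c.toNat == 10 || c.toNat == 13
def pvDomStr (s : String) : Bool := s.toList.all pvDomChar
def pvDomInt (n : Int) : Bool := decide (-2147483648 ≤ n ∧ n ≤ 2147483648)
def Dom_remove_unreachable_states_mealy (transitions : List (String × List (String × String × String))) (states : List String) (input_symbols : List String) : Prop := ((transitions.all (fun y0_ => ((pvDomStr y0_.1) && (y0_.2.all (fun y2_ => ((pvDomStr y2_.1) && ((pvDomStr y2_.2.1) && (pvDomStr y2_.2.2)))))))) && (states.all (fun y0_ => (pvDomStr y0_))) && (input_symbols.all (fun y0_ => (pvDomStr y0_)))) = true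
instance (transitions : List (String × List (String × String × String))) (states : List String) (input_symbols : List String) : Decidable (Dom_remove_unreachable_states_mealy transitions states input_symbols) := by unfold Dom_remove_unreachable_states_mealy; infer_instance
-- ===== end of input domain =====

-- B replaces A's set-worklist reachability traversal by fixpoint saturation sweeps over the
-- whole transition table and rebuilds the pruned inner dicts by filtering instead of deleting
-- keys in place (the Python return values coincide; A mutates the inner dicts in place while
-- B rebinds transitions[sym] to rebuilt dicts — only the return value is proved equal here).

-- ===== PORT A =====
-- transitions[sym] as an inner dict's item list ({} for a missing key; Pre_ rules the KeyError out)
def pvTable (transitions : List (String × List (String × String × String))) (sym : String) : List (String × String × String) :=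
  (PySem.Dict.mk transitions).getD sym []

-- fuel bound for the worklist / saturation loops: 2 + total number of transition entries
-- (each iteration of either Python loop grows the reachable set, which lives among the
-- successor states, so this fuel is never exhausted — proved below)
def pvFuel (transitions : List (String × List (String × String × String))) (input_symbols : List String) : Nat :=
  2 + (input_symbols.map (fun sym => (pvTable transitions sym).length)).sum

-- the inner 'for input_symbol in input_symbols' of A's while loop
def pvA_step (transitions : List (String × List (String × String × String))) (input_symbols : List String) (c : String) (reach : PySem.Set String) (visit : PySem.Set String) : PySem.Set String :=
  input_symbols.foldl (fun v sym =>
    match (PySem.Dict.mk (pvTable transitions sym)).get? c with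
    | some (nxt, _) => if PySem.Set.contains reach nxt then v else PySem.Set.add v nxt
    | none => v) visit

-- A's 'while states_to_visit' worklist (set.pop ported as taking the first element; the
-- resulting reachable set does not depend on the pop order)
def pvA_loop (transitions : List (String × List (String × String × String))) (input_symbols : List String) : Nat → PySem.Set String → PySem.Set String → PySem.Set String
  | 0, _, reach => reach
  | _ + 1, [], reach => reach
  | fuel + 1, c :: vs, reach =>
      pvA_loop transitions input_symbols fuel
        (pvA_step transitions input_symbols c (PySem.Set.add reach c) vs)
        (PySem.Set.add reach c)

-- A's 'for state in list(transitions[input_symbol].keys()): if …: del …'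
def pvA_prune (reach : PySem.Set String) (tbl : List (String × String × String)) : List (String × String × String) :=
  ((PySem.Dict.mk tbl).keys).foldl
    (fun t st => if PySem.Set.contains reach st then t else ((PySem.Dict.mk t).erase st).items) tbl

def remove_unreachable_states_mealy (transitions : List (String × List (String × String × String))) (states : List String) (input_symbols : List String) : (List (String × List (String × String × String))) × List String :=
  let reach := pvA_loop transitions input_symbols (pvFuel transitions input_symbols) [PySem.List.pyGetD states 0 ""] []
  let pruned := input_symbols.foldl (fun td sym => td.insert sym (pvA_prune reach (td.getD sym []))) (PySem.Dict.mk transitions)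
  (pruned.items, states.filter (fun st => PySem.Set.contains reach st))

-- ===== PORT B =====
-- one full sweep 'for sym in input_symbols: for st, (nxt, _) in transitions[sym].items(): …'
def pvB_pass (transitions : List (String × List (String × String × String))) (input_symbols : List String) (reach : PySem.Set String) : PySem.Set String × Bool :=
  input_symbols.foldl (fun acc sym =>
    (pvTable transitions sym).foldl (fun acc e =>
      if PySem.Set.contains acc.1 e.1 && !PySem.Set.contains acc.1 e.2.1
      then (PySem.Set.add acc.1 e.2.1, true) else acc) acc) (reach, false)

-- B's 'while changed' saturation loop
def pvB_loop (transitions : List (String × List (String × String × String))) (input_symbols : List String) : Nat → PySem.Set String → PySem.Set String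
  | 0, reach => reach
  | fuel + 1, reach =>
      let p := pvB_pass transitions input_symbols reach
      if p.2 then pvB_loop transitions input_symbols fuel p.1 else p.1

def remove_unreachable_states_mealy_alt (transitions : List (String × List (String × String × String))) (states : List String) (input_symbols : List String) : (List (String × List (String × String × String))) × List String :=
  let reach := pvB_loop transitions input_symbols (pvFuel transitions input_symbols) [PySem.List.pyGetD states 0 ""]
  let pruned := input_symbols.foldl (fun td sym => td.insert sym ((td.getD sym []).filter (fun e => PySem.Set.contains reach e.1))) (PySem.Dict.mk transitions)
  (pruned.items, states.filter (fun st => PySem.Set.contains reach st))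

-- ===== PRECONDITION & SPEC =====
-- Pre_ excludes exactly the inputs where the Python A raises — an empty states list
-- (IndexError on states[0]) or an input symbol missing from transitions (KeyError) — and
-- association lists whose inner tables carry duplicate keys, which do not represent any
-- Python dict (Python's dicts cannot hold them).
def Pre_remove_unreachable_states_mealy (transitions : List (String × List (String × String × String))) (states : List String) (input_symbols : List String) : Prop :=
  states ≠ [] ∧ (∀ sym ∈ input_symbols, sym ∈ transitions.map (fun p => p.1)) ∧
    (∀ p ∈ transitions, (p.2.map (fun e => e.1)).Nodup)
instance (transitions : List (String × List (String × String × String))) (states : List String) (input_symbols : List String) : Decidable (Pre_remove_unreachable_states_mealy transitions states input_symbols) := by unfold Pre_remove_unreachable_states_mealy; infer_instance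

def pvWitness_remove_unreachable_states_mealy : (List (String × List (String × String × String))) × List String × List String :=
  ([("x", [("s0", ("s1", "0")), ("s1", ("s0", "1")), ("s2", ("s2", "0"))])], (["s0", "s1", "s2"], ["x"]))

def Spec_remove_unreachable_states_mealy (transitions : List (String × List (String × String × String))) (states : List String) (input_symbols : List String) (out : (List (String × List (String × String × String))) × List String) : Prop := out = remove_unreachable_states_mealy_alt transitions states input_symbols
instance (transitions : List (String × List (String × String × String))) (states : List String) (input_symbols : List String) (out : (List (String × List (String × String × String))) × List String) : Decidable (Spec_remove_unreachable_states_mealy transitions states input_symbols out) := by unfold Spec_remove_unreachable_states_mealy; infer_instance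

-- ===== CLAIM (what is proved, stated in full; the proofs are below) =====
def Claim_equal_remove_unreachable_states_mealy : Prop := ∀ (transitions : List (String × List (String × String × String))) (states : List String) (input_symbols : List String), Dom_remove_unreachable_states_mealy transitions states input_symbols → Pre_remove_unreachable_states_mealy transitions states input_symbols → Spec_remove_unreachable_states_mealy transitions states input_symbols (remove_unreachable_states_mealy transitions states input_symbols)

-- ===== LEMMAS AND PROOFS =====

-- the one-step successor relation of the machine (restricted to input_symbols)
def pvStepRel (T : List (String × List (String × String × String))) (I : List String) (s t : String) : Prop :=
  ∃ sym ∈ I, ∃ o, (s, (t, o)) ∈ pvTable T sym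

-- the same step, through a dict lookup (what A's worklist body performs)
def pvLook (T : List (String × List (String × String × String))) (I : List String) (s t : String) : Prop :=
  ∃ sym ∈ I, ∃ o, (PySem.Dict.mk (pvTable T sym)).get? s = some (t, o)

inductive pvReach (T : List (String × List (String × String × String))) (I : List String) (start : String) : String → Prop
  | base : pvReach T I start start
  | step {s t : String} : pvReach T I start s → pvStepRel T I s t → pvReach T I start t

def pvEntries (T : List (String × List (String × String × String))) (I : List String) : List (String × String × String) :=
  I.flatMap (fun sym => pvTable T sym)

-- universe of candidate reachable states
def pvU (T : List (String × List (String × String × String))) (I : List String) (start : String) : List String :=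
  start :: (pvEntries T I).map (fun e => e.2.1)

lemma pvTable_nodup {T : List (String × List (String × String × String))}
    (hnd : ∀ p ∈ T, (p.2.map (fun e => e.1)).Nodup) (sym : String) :
    ((pvTable T sym).map (fun e => e.1)).Nodup := by
  unfold pvTable
  rw [PySem.Dict.getD_eq_get?_getD]
  cases hg : (PySem.Dict.mk T).get? sym with
  | none => simp
  | some v =>
    have := PySem.Dict.mem_items_of_get?_eq_some (d := PySem.Dict.mk T) hg
    exact hnd _ this

lemma pvLook_to_step {T : List (String × List (String × String × String))} {I : List String} {s t : String} (h : pvLook T I s t) : pvStepRel T I s t := by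
  obtain ⟨sym, hsym, o, hg⟩ := h
  have := PySem.Dict.mem_items_of_get?_eq_some (d := PySem.Dict.mk (pvTable T sym)) hg
  exact ⟨sym, hsym, o, this⟩

lemma pvStep_to_look {T : List (String × List (String × String × String))} {I : List String} {s t : String}
    (hnd : ∀ p ∈ T, (p.2.map (fun e => e.1)).Nodup) (h : pvStepRel T I s t) : pvLook T I s t := by
  obtain ⟨sym, hsym, o, hm⟩ := h
  refine ⟨sym, hsym, o, ?_⟩
  exact PySem.Dict.get?_of_mem_items (PySem.Dict.mk (pvTable T sym)) hm (pvTable_nodup hnd sym)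

lemma pvStep_mem_entries {T : List (String × List (String × String × String))} {I : List String} {s t : String}
    (h : pvStepRel T I s t) : ∃ o, (s, (t, o)) ∈ pvEntries T I := by
  obtain ⟨sym, hsym, o, hm⟩ := h
  exact ⟨o, List.mem_flatMap.mpr ⟨sym, hsym, hm⟩⟩

lemma pvEntries_mem_U {T : List (String × List (String × String × String))} {I : List String} {start s t o : String}
    (h : (s, (t, o)) ∈ pvEntries T I) : t ∈ pvU T I start := by
  unfold pvU
  exact List.mem_cons_of_mem _ (List.mem_map.mpr ⟨(s, (t, o)), h, rfl⟩)

lemma pvCard_absurd {T : List (String × List (String × String × String))} {I : List String} {start : String}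
    {r : List String} (hnd : r.Nodup) (hsub : ∀ s ∈ r, s ∈ pvU T I start)
    (hlen : (pvU T I start).toFinset.card + 1 ≤ r.length) : False := by
  have h1 : r.toFinset.card = r.length := List.toFinset_card_of_nodup hnd
  have h2 : r.toFinset ⊆ (pvU T I start).toFinset := by
    intro x hx
    rw [List.mem_toFinset] at *
    exact hsub x hx
  have := Finset.card_le_card h2
  omega

lemma pvU_card_le_fuel {T : List (String × List (String × String × String))} {I : List String} {start : String} :
    (pvU T I start).toFinset.card + 1 ≤ pvFuel T I := by
  have h1 : (pvU T I start).toFinset.card ≤ (pvU T I start).length := List.toFinset_card_le _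
  have h2 : (pvU T I start).length = 1 + (I.map (fun sym => (pvTable T sym).length)).sum := by
    simp [pvU, pvEntries, List.length_flatMap]
    omega
  unfold pvFuel
  omega

-- ---- A side ----

lemma mem_pvA_step {T : List (String × List (String × String × String))} {I : List String} {c : String}
    {r vs : PySem.Set String} {t : String} :
    t ∈ pvA_step T I c r vs ↔ t ∈ vs ∨ (pvLook T I c t ∧ t ∉ r) := by
  induction I generalizing vs with
  | nil => simp [pvA_step, pvLook]
  | cons sym syms ih =>
    have hstep : pvA_step T (sym :: syms) c r vs = pvA_step T syms c r
        (match (PySem.Dict.mk (pvTable T sym)).get? c with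
          | some (nxt, _) => if PySem.Set.contains r nxt then vs else PySem.Set.add vs nxt
          | none => vs) := rfl
    have hcons : pvLook T (sym :: syms) c t ↔
        ((∃ o, (PySem.Dict.mk (pvTable T sym)).get? c = some (t, o)) ∨ pvLook T syms c t) := by
      unfold pvLook
      constructor
      · rintro ⟨sy, hsy, o, hg⟩
        rcases List.mem_cons.mp hsy with h | h
        · exact Or.inl ⟨o, h ▸ hg⟩
        · exact Or.inr ⟨sy, h, o, hg⟩
      · rintro (⟨o, hg⟩ | ⟨sy, hsy, o, hg⟩)
        · exact ⟨sym, List.mem_cons_self, o, hg⟩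
        · exact ⟨sy, List.mem_cons_of_mem _ hsy, o, hg⟩
    rw [hstep, ih, hcons]
    cases hg : (PySem.Dict.mk (pvTable T sym)).get? c with
    | none => simp
    | some v =>
      obtain ⟨nxt, o⟩ := v
      by_cases hnr : nxt ∈ r
      · have : PySem.Set.contains r nxt = true := (PySem.Set.contains_iff r nxt).mpr hnr
        simp only [this, if_pos]
        constructor
        · rintro (h | h)
          · exact Or.inl h
          · exact Or.inr ⟨Or.inr h.1, h.2⟩
        · rintro (h | ⟨hl | hl, hnr'⟩)
          · exact Or.inl h
          · obtain ⟨o', ho'⟩ := hl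
            simp only [Option.some.injEq, Prod.mk.injEq] at ho'
            obtain ⟨rfl, -⟩ := ho'
            exact absurd hnr hnr'
          · exact Or.inr ⟨hl, hnr'⟩
      · have : PySem.Set.contains r nxt = false := by
          rw [← Bool.not_eq_true, PySem.Set.contains_iff]; exact hnr
        simp only [this, Bool.false_eq_true, if_false]
        rw [show (t ∈ PySem.Set.add vs nxt) ↔ (t ∈ vs ∨ t = nxt) from PySem.Set.mem_add vs nxt t]
        constructor
        · rintro ((h | rfl) | h)
          · exact Or.inl h
          · exact Or.inr ⟨Or.inl ⟨o, rfl⟩, hnr⟩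
          · exact Or.inr ⟨Or.inr h.1, h.2⟩
        · rintro (h | ⟨hl | hl, hnr'⟩)
          · exact Or.inl (Or.inl h)
          · obtain ⟨o', ho'⟩ := hl
            simp only [Option.some.injEq, Prod.mk.injEq] at ho'
            obtain ⟨rfl, -⟩ := ho'
            exact Or.inl (Or.inr rfl)
          · exact Or.inr ⟨hl, hnr'⟩

lemma nodup_pvA_step {T : List (String × List (String × String × String))} {I : List String} {c : String}
    {r vs : PySem.Set String} (h : vs.Nodup) : (pvA_step T I c r vs).Nodup := by
  induction I generalizing vs with
  | nil => exact h
  | cons sym syms ih =>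
    have hstep : pvA_step T (sym :: syms) c r vs = pvA_step T syms c r
        (match (PySem.Dict.mk (pvTable T sym)).get? c with
          | some (nxt, _) => if PySem.Set.contains r nxt then vs else PySem.Set.add vs nxt
          | none => vs) := rfl
    rw [hstep]
    apply ih
    cases hg : (PySem.Dict.mk (pvTable T sym)).get? c with
    | none => simpa [hg] using h
    | some v =>
      obtain ⟨nxt, o⟩ := v
      by_cases hm : nxt ∈ r
      · simpa [hm, PySem.Set.contains_iff] using h
      · have hc : PySem.Set.contains r nxt = false := by
          rw [← Bool.not_eq_true, PySem.Set.contains_iff]; exact hm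
        simpa [hc, hm] using PySem.Set.nodup_add vs nxt h

lemma pvA_loop_sound {T : List (String × List (String × String × String))} {I : List String}
    {P : String → Prop} (hP : ∀ s t, P s → pvLook T I s t → P t) :
    ∀ (fuel : Nat) (visit reach : PySem.Set String), (∀ s ∈ visit, P s) → (∀ s ∈ reach, P s) →
      ∀ s ∈ pvA_loop T I fuel visit reach, P s := by
  intro fuel
  induction fuel with
  | zero => intro visit reach _ hr s hs; exact hr s hs
  | succ fuel ih =>
    intro visit reach hv hr s hs
    cases visit with
    | nil => exact hr s hs
    | cons c vs =>
      have hc : P c := hv c List.mem_cons_self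
      refine ih _ _ ?_ ?_ s hs
      · intro x hx
        rcases mem_pvA_step.mp hx with h | ⟨hl, _⟩
        · exact hv x (List.mem_cons_of_mem _ h)
        · exact hP c x hc hl
      · intro x hx
        rcases (PySem.Set.mem_add reach c x).mp hx with h | rfl
        · exact hr x h
        · exact hc

lemma pvA_loop_spec {T : List (String × List (String × String × String))} {I : List String} {start : String} :
    ∀ (fuel : Nat) (visit reach : PySem.Set String),
      reach.Nodup → visit.Nodup →
      (∀ s ∈ visit, s ∉ reach) →
      (∀ s ∈ reach, s ∈ pvU T I start) → (∀ s ∈ visit, s ∈ pvU T I start) →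
      (pvU T I start).toFinset.card + 1 ≤ fuel + reach.length →
      (∀ s ∈ reach, ∀ t, pvLook T I s t → t ∈ reach ∨ t ∈ visit) →
      (∀ s ∈ reach, s ∈ pvA_loop T I fuel visit reach) ∧
      (∀ s ∈ visit, s ∈ pvA_loop T I fuel visit reach) ∧
      (∀ s ∈ pvA_loop T I fuel visit reach, ∀ t, pvLook T I s t → t ∈ pvA_loop T I fuel visit reach) := by
  intro fuel
  induction fuel with
  | zero =>
    intro visit reach hrn _ _ hrU _ hfuel _
    exact (pvCard_absurd hrn hrU (by omega)).elim
  | succ fuel ih =>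
    intro visit reach hrn hvn hdisj hrU hvU hfuel hcl
    cases visit with
    | nil =>
      refine ⟨fun s hs => hs, fun s hs => (List.not_mem_nil hs).elim, ?_⟩
      intro s hs t ht
      rcases hcl s hs t ht with h | h
      · exact h
      · exact (List.not_mem_nil h).elim
    | cons c vs =>
      have hcnr : c ∉ reach := hdisj c List.mem_cons_self
      have hadd : PySem.Set.add reach c = reach ++ [c] := PySem.Set.add_of_not_mem hcnr
      have hlen : (PySem.Set.add reach c).length = reach.length + 1 := by
        rw [hadd]; simp
      have hvsn : vs.Nodup := (List.nodup_cons.mp hvn).2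
      have hcvs : c ∉ vs := (List.nodup_cons.mp hvn).1
      have hloop : pvA_loop T I (fuel + 1) (c :: vs) reach
          = pvA_loop T I fuel (pvA_step T I c (PySem.Set.add reach c) vs) (PySem.Set.add reach c) := rfl
      have hmemadd : ∀ x, x ∈ PySem.Set.add reach c ↔ x ∈ reach ∨ x = c :=
        fun x => PySem.Set.mem_add reach c x
      obtain ⟨h1, h2, h3⟩ := ih (pvA_step T I c (PySem.Set.add reach c) vs) (PySem.Set.add reach c)
        (PySem.Set.nodup_add reach c hrn)
        (nodup_pvA_step hvsn)
        (by
          intro s hs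
          rcases mem_pvA_step.mp hs with h | ⟨_, hnr⟩
          · intro hmem
            rcases (hmemadd s).mp hmem with h' | rfl
            · exact hdisj s (List.mem_cons_of_mem _ h) h'
            · exact hcvs h
          · exact hnr)
        (by
          intro s hs
          rcases (hmemadd s).mp hs with h | hEq
          · exact hrU s h
          · exact hvU s (List.mem_cons.mpr (Or.inl hEq)))
        (by
          intro s hs
          rcases mem_pvA_step.mp hs with h | ⟨hl, _⟩
          · exact hvU s (List.mem_cons_of_mem _ h)
          · obtain ⟨o, ho⟩ := pvStep_mem_entries (pvLook_to_step hl)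
            exact pvEntries_mem_U ho)
        (by omega)
        (by
          intro s hs t ht
          rcases (hmemadd s).mp hs with h | hEq
          · rcases hcl s h t ht with h' | h'
            · exact Or.inl ((hmemadd t).mpr (Or.inl h'))
            · rcases List.mem_cons.mp h' with rfl | h''
              · exact Or.inl ((hmemadd t).mpr (Or.inr rfl))
              · exact Or.inr (mem_pvA_step.mpr (Or.inl h''))
          · by_cases htr : t ∈ PySem.Set.add reach c
            · exact Or.inl htr
            · exact Or.inr (mem_pvA_step.mpr (Or.inr ⟨hEq ▸ ht, htr⟩)))
      rw [hloop]
      refine ⟨?_, ?_, h3⟩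
      · intro s hs
        exact h1 s ((hmemadd s).mpr (Or.inl hs))
      · intro s hs
        rcases List.mem_cons.mp hs with rfl | h
        · exact h1 s ((hmemadd s).mpr (Or.inr rfl))
        · exact h2 s (mem_pvA_step.mpr (Or.inl h))

lemma pvA_reach_iff {T : List (String × List (String × String × String))} {I : List String} {start : String}
    (hnd : ∀ p ∈ T, (p.2.map (fun e => e.1)).Nodup) (s : String) :
    s ∈ pvA_loop T I (pvFuel T I) [start] [] ↔ pvReach T I start s := by
  constructor
  · intro hs
    refine pvA_loop_sound (P := pvReach T I start)
      (fun a b ha hl => pvReach.step ha (pvLook_to_step hl))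
      (pvFuel T I) [start] [] ?_ ?_ s hs
    · intro x hx
      rcases List.mem_cons.mp hx with rfl | h
      · exact pvReach.base
      · exact absurd h (List.not_mem_nil)
    · intro x hx; exact absurd hx (List.not_mem_nil)
  · intro hs
    obtain ⟨h1, h2, h3⟩ := pvA_loop_spec (T := T) (I := I) (start := start) (pvFuel T I) [start] []
      List.nodup_nil (List.nodup_singleton _)
      (fun s hs => List.not_mem_nil)
      (fun s hs => absurd hs (List.not_mem_nil))
      (by
        intro x hx
        rcases List.mem_cons.mp hx with rfl | h
        · exact List.mem_cons_self
        · exact absurd h (List.not_mem_nil))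
      (by have := pvU_card_le_fuel (T := T) (I := I) (start := start); omega)
      (fun s hs => absurd hs (List.not_mem_nil))
    induction hs with
    | base => exact h2 start List.mem_cons_self
    | step ha hl ih => exact h3 _ ih _ (pvStep_to_look hnd hl)

-- ---- B side ----

-- single-entry step of a sweep, for the remaining lemmas
def pvBStep (acc : PySem.Set String × Bool) (e : String × String × String) : PySem.Set String × Bool :=
  if PySem.Set.contains acc.1 e.1 && !PySem.Set.contains acc.1 e.2.1
  then (PySem.Set.add acc.1 e.2.1, true) else acc

lemma pvB_pass_eq {T : List (String × List (String × String × String))} {I : List String} {reach : PySem.Set String} :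
    pvB_pass T I reach = (pvEntries T I).foldl pvBStep (reach, false) := by
  unfold pvB_pass pvEntries pvBStep
  rw [List.foldl_flatMap]

lemma pvB_fold_prefix (es : List (String × String × String)) :
    ∀ (r : PySem.Set String) (ch : Bool), r <+: (es.foldl pvBStep (r, ch)).1 := by
  induction es with
  | nil => intro r ch; exact List.prefix_refl r
  | cons e es ih =>
    intro r ch
    show r <+: ((es.foldl pvBStep (pvBStep (r, ch) e))).1
    by_cases hc : (PySem.Set.contains r e.1 && !PySem.Set.contains r e.2.1) = true
    · have hnm : e.2.1 ∉ r := by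
        have h2 := Bool.and_elim_right hc
        rw [Bool.not_eq_eq_eq_not, Bool.not_true] at h2
        intro hmem
        rw [(PySem.Set.contains_iff r e.2.1).mpr hmem] at h2
        exact Bool.true_eq_false.mp h2
      have : pvBStep (r, ch) e = (r ++ [e.2.1], true) := by
        unfold pvBStep; rw [hc]; simp [PySem.Set.add_of_not_mem hnm]
      rw [this]
      exact List.IsPrefix.trans ⟨[e.2.1], rfl⟩ (ih (r ++ [e.2.1]) true)
    · have : pvBStep (r, ch) e = (r, ch) := by unfold pvBStep; rw [Bool.eq_false_iff.mpr hc]; simp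
      rw [this]
      exact ih r ch

lemma pvB_fold_nodup (es : List (String × String × String)) :
    ∀ (r : PySem.Set String) (ch : Bool), r.Nodup → (es.foldl pvBStep (r, ch)).1.Nodup := by
  induction es with
  | nil => intro r ch h; exact h
  | cons e es ih =>
    intro r ch h
    show ((es.foldl pvBStep (pvBStep (r, ch) e))).1.Nodup
    by_cases hc : (PySem.Set.contains r e.1 && !PySem.Set.contains r e.2.1) = true
    · have : pvBStep (r, ch) e = (PySem.Set.add r e.2.1, true) := by
        unfold pvBStep; rw [hc]; simp
      rw [this]
      exact ih _ _ (PySem.Set.nodup_add r e.2.1 h)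
    · have : pvBStep (r, ch) e = (r, ch) := by unfold pvBStep; rw [Bool.eq_false_iff.mpr hc]; simp
      rw [this]
      exact ih r ch h

lemma pvB_fold_subU {T : List (String × List (String × String × String))} {I : List String} {start : String}
    {es : List (String × String × String)} (hes : ∀ e ∈ es, e ∈ pvEntries T I) :
    ∀ (r : PySem.Set String) (ch : Bool), (∀ s ∈ r, s ∈ pvU T I start) →
      ∀ s ∈ (es.foldl pvBStep (r, ch)).1, s ∈ pvU T I start := by
  induction es with
  | nil => intro r ch h s hs; exact h s hs
  | cons e es ih =>
    intro r ch h s hs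
    have he : e ∈ pvEntries T I := hes e List.mem_cons_self
    have hes' : ∀ x ∈ es, x ∈ pvEntries T I := fun x hx => hes x (List.mem_cons_of_mem _ hx)
    revert hs
    show s ∈ ((es.foldl pvBStep (pvBStep (r, ch) e))).1 → _
    by_cases hc : (PySem.Set.contains r e.1 && !PySem.Set.contains r e.2.1) = true
    · have hst : pvBStep (r, ch) e = (PySem.Set.add r e.2.1, true) := by
        unfold pvBStep; rw [hc]; simp
      rw [hst]
      intro hs
      refine ih hes' _ _ ?_ s hs
      intro x hx
      rcases (PySem.Set.mem_add r e.2.1 x).mp hx with h' | hEq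
      · exact h x h'
      · exact hEq ▸ pvEntries_mem_U (s := e.1) (o := e.2.2) (by simpa using he)
    · have hst : pvBStep (r, ch) e = (r, ch) := by unfold pvBStep; rw [Bool.eq_false_iff.mpr hc]; simp
      rw [hst]
      intro hs
      exact ih hes' r ch h s hs

lemma pvB_fold_sound {T : List (String × List (String × String × String))} {I : List String}
    {P : String → Prop} (hP : ∀ s t, P s → pvStepRel T I s t → P t) :
    ∀ (es : List (String × String × String)), (∀ e ∈ es, e ∈ pvEntries T I) →
      ∀ (r : PySem.Set String) (ch : Bool), (∀ s ∈ r, P s) →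
        ∀ s ∈ (es.foldl pvBStep (r, ch)).1, P s := by
  intro es
  induction es with
  | nil => intro _ r ch h s hs; exact h s hs
  | cons e es ih =>
    intro hes r ch h s hs
    have he : e ∈ pvEntries T I := hes e List.mem_cons_self
    have hes' : ∀ x ∈ es, x ∈ pvEntries T I := fun x hx => hes x (List.mem_cons_of_mem _ hx)
    revert hs
    show s ∈ ((es.foldl pvBStep (pvBStep (r, ch) e))).1 → _
    by_cases hc : (PySem.Set.contains r e.1 && !PySem.Set.contains r e.2.1) = true
    · have hm1 : e.1 ∈ r := by
        exact (PySem.Set.contains_iff r e.1).mp (Bool.and_elim_left hc)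
      have hstep : pvStepRel T I e.1 e.2.1 := by
        obtain ⟨sym, hsym, hmem⟩ := List.mem_flatMap.mp he
        exact ⟨sym, hsym, e.2.2, by simpa using hmem⟩
      have hst : pvBStep (r, ch) e = (PySem.Set.add r e.2.1, true) := by
        unfold pvBStep; rw [hc]; simp
      rw [hst]
      intro hs
      refine ih hes' _ _ ?_ s hs
      intro x hx
      rcases (PySem.Set.mem_add r e.2.1 x).mp hx with h' | hEq
      · exact h x h'
      · exact hEq ▸ hP e.1 e.2.1 (h e.1 hm1) hstep
    · have hst : pvBStep (r, ch) e = (r, ch) := by unfold pvBStep; rw [Bool.eq_false_iff.mpr hc]; simp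
      rw [hst]
      intro hs
      exact ih hes' r ch h s hs

lemma pvB_fold_flag_true (es : List (String × String × String)) :
    ∀ (r : PySem.Set String), (es.foldl pvBStep (r, true)).2 = true := by
  induction es with
  | nil => intro r; rfl
  | cons e es ih =>
    intro r
    show ((es.foldl pvBStep (pvBStep (r, true) e))).2 = true
    by_cases hc : (PySem.Set.contains r e.1 && !PySem.Set.contains r e.2.1) = true
    · have : pvBStep (r, true) e = (PySem.Set.add r e.2.1, true) := by
        unfold pvBStep; rw [hc]; simp
      rw [this]; exact ih _
    · have : pvBStep (r, true) e = (r, true) := by unfold pvBStep; rw [Bool.eq_false_iff.mpr hc]; simp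
      rw [this]; exact ih r

lemma pvB_fold_flag_false (es : List (String × String × String)) :
    ∀ (r : PySem.Set String), (es.foldl pvBStep (r, false)).2 = false →
      (es.foldl pvBStep (r, false)).1 = r ∧ ∀ e ∈ es, e.1 ∈ r → e.2.1 ∈ r := by
  induction es with
  | nil => intro r _; exact ⟨rfl, fun e he => absurd he (List.not_mem_nil)⟩
  | cons e es ih =>
    intro r hflag
    by_cases hc : (PySem.Set.contains r e.1 && !PySem.Set.contains r e.2.1) = true
    · have hst : pvBStep (r, false) e = (PySem.Set.add r e.2.1, true) := by
        unfold pvBStep; rw [hc]; simp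
      have : ((e :: es).foldl pvBStep (r, false)).2 = true := by
        show ((es.foldl pvBStep (pvBStep (r, false) e))).2 = true
        rw [hst]
        exact pvB_fold_flag_true es _
      rw [this] at hflag
      exact absurd hflag (by simp)
    · have hst : pvBStep (r, false) e = (r, false) := by unfold pvBStep; rw [Bool.eq_false_iff.mpr hc]; simp
      have hrw : (e :: es).foldl pvBStep (r, false) = es.foldl pvBStep (r, false) := by
        show es.foldl pvBStep (pvBStep (r, false) e) = _
        rw [hst]
      rw [hrw] at hflag ⊢
      obtain ⟨h1, h2⟩ := ih r hflag
      refine ⟨h1, ?_⟩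
      intro x hx hx1
      rcases List.mem_cons.mp hx with rfl | h
      · by_contra hnm
        have : (PySem.Set.contains r x.1 && !PySem.Set.contains r x.2.1) = true := by
          rw [(PySem.Set.contains_iff r x.1).mpr hx1]
          rw [show PySem.Set.contains r x.2.1 = false from by
            rw [← Bool.not_eq_true, PySem.Set.contains_iff]; exact hnm]
          rfl
        exact hc this
      · exact h2 x h hx1

lemma pvB_fold_grow (es : List (String × String × String)) :
    ∀ (r : PySem.Set String), (es.foldl pvBStep (r, false)).2 = true →
      r.length + 1 ≤ (es.foldl pvBStep (r, false)).1.length := by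
  induction es with
  | nil => intro r h; exact absurd h (by simp)
  | cons e es ih =>
    intro r hflag
    by_cases hc : (PySem.Set.contains r e.1 && !PySem.Set.contains r e.2.1) = true
    · have hnm : e.2.1 ∉ r := by
        have h2 := Bool.and_elim_right hc
        rw [Bool.not_eq_eq_eq_not, Bool.not_true] at h2
        intro hmem
        rw [(PySem.Set.contains_iff r e.2.1).mpr hmem] at h2
        exact Bool.true_eq_false.mp h2
      have hst : pvBStep (r, false) e = (r ++ [e.2.1], true) := by
        unfold pvBStep; rw [hc]; simp [PySem.Set.add_of_not_mem hnm]
      have hpre := pvB_fold_prefix es (r ++ [e.2.1]) true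
      have hlen := List.IsPrefix.length_le hpre
      show r.length + 1 ≤ ((es.foldl pvBStep (pvBStep (r, false) e))).1.length
      rw [hst]
      simpa using hlen
    · have hst : pvBStep (r, false) e = (r, false) := by unfold pvBStep; rw [Bool.eq_false_iff.mpr hc]; simp
      have hrw : (e :: es).foldl pvBStep (r, false) = es.foldl pvBStep (r, false) := by
        show es.foldl pvBStep (pvBStep (r, false) e) = _
        rw [hst]
      rw [hrw] at hflag ⊢
      exact ih r hflag

lemma pvB_loop_sound {T : List (String × List (String × String × String))} {I : List String}
    {P : String → Prop} (hP : ∀ s t, P s → pvStepRel T I s t → P t) :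
    ∀ (fuel : Nat) (reach : PySem.Set String), (∀ s ∈ reach, P s) →
      ∀ s ∈ pvB_loop T I fuel reach, P s := by
  intro fuel
  induction fuel with
  | zero => intro reach h s hs; exact h s hs
  | succ fuel ih =>
    intro reach h s hs
    have hpass : ∀ x ∈ (pvB_pass T I reach).1, P x := by
      rw [pvB_pass_eq]
      exact pvB_fold_sound hP (pvEntries T I) (fun e he => he) reach false h
    by_cases hb : (pvB_pass T I reach).2 = true
    · rw [show pvB_loop T I (fuel + 1) reach
          = if (pvB_pass T I reach).2 then pvB_loop T I fuel (pvB_pass T I reach).1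
            else (pvB_pass T I reach).1 from rfl, if_pos hb] at hs
      exact ih _ hpass s hs
    · rw [show pvB_loop T I (fuel + 1) reach
          = if (pvB_pass T I reach).2 then pvB_loop T I fuel (pvB_pass T I reach).1
            else (pvB_pass T I reach).1 from rfl, if_neg hb] at hs
      exact hpass s hs

lemma pvB_loop_spec {T : List (String × List (String × String × String))} {I : List String} {start : String} :
    ∀ (fuel : Nat) (reach : PySem.Set String),
      reach.Nodup → (∀ s ∈ reach, s ∈ pvU T I start) →
      (pvU T I start).toFinset.card + 1 ≤ fuel + reach.length →
      (∀ s ∈ reach, s ∈ pvB_loop T I fuel reach) ∧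
      (∀ e ∈ pvEntries T I, e.1 ∈ pvB_loop T I fuel reach → e.2.1 ∈ pvB_loop T I fuel reach) := by
  intro fuel
  induction fuel with
  | zero => intro reach hn hU hfuel; exact (pvCard_absurd hn hU (by omega)).elim
  | succ fuel ih =>
    intro reach hn hU hfuel
    by_cases hb : (pvB_pass T I reach).2 = true
    · have hloop : pvB_loop T I (fuel + 1) reach = pvB_loop T I fuel (pvB_pass T I reach).1 := by
        rw [show pvB_loop T I (fuel + 1) reach
          = if (pvB_pass T I reach).2 then pvB_loop T I fuel (pvB_pass T I reach).1
            else (pvB_pass T I reach).1 from rfl, if_pos hb]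
      have hgrow : reach.length + 1 ≤ (pvB_pass T I reach).1.length := by
        rw [pvB_pass_eq]
        exact pvB_fold_grow (pvEntries T I) reach (by rw [← pvB_pass_eq]; exact hb)
      have hpre : reach <+: (pvB_pass T I reach).1 := by
        rw [pvB_pass_eq]
        exact pvB_fold_prefix (pvEntries T I) reach false
      obtain ⟨h1, h2⟩ := ih (pvB_pass T I reach).1
        (by rw [pvB_pass_eq]; exact pvB_fold_nodup (pvEntries T I) reach false hn)
        (by rw [pvB_pass_eq]; exact pvB_fold_subU (fun e he => he) reach false hU)
        (by omega)
      rw [hloop]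
      exact ⟨fun s hs => h1 s (List.IsPrefix.mem hs hpre), h2⟩
    · have hb' : (pvB_pass T I reach).2 = false := by
        revert hb; cases (pvB_pass T I reach).2 <;> simp
      have hloop : pvB_loop T I (fuel + 1) reach = (pvB_pass T I reach).1 := by
        rw [show pvB_loop T I (fuel + 1) reach
          = if (pvB_pass T I reach).2 then pvB_loop T I fuel (pvB_pass T I reach).1
            else (pvB_pass T I reach).1 from rfl, if_neg hb]
      have hff := pvB_fold_flag_false (pvEntries T I) reach (by rw [← pvB_pass_eq]; exact hb')
      obtain ⟨h1, h2⟩ := hff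
      rw [hloop, pvB_pass_eq, h1]
      exact ⟨fun s hs => hs, h2⟩

lemma pvB_reach_iff {T : List (String × List (String × String × String))} {I : List String} {start : String} (s : String) :
    s ∈ pvB_loop T I (pvFuel T I) [start] ↔ pvReach T I start s := by
  constructor
  · intro hs
    refine pvB_loop_sound (P := pvReach T I start)
      (fun a b ha hstep => pvReach.step ha hstep) (pvFuel T I) [start] ?_ s hs
    intro x hx
    rcases List.mem_cons.mp hx with rfl | h
    · exact pvReach.base
    · exact absurd h (List.not_mem_nil)
  · intro hs
    obtain ⟨h1, h2⟩ := pvB_loop_spec (T := T) (I := I) (start := start) (pvFuel T I) [start]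
      (List.nodup_singleton _)
      (by
        intro x hx
        rcases List.mem_cons.mp hx with rfl | h
        · exact List.mem_cons_self
        · exact absurd h (List.not_mem_nil))
      (by have := pvU_card_le_fuel (T := T) (I := I) (start := start); omega)
    induction hs with
    | base => exact h1 start List.mem_cons_self
    | step ha hstep ih =>
      obtain ⟨o, ho⟩ := pvStep_mem_entries hstep
      exact h2 _ ho ih

-- ---- pruning ----

lemma pvA_prune_gen (reach : PySem.Set String) (ks : List String) :
    ∀ (t : List (String × String × String)),
      ks.foldl (fun t st => if PySem.Set.contains reach st then t else ((PySem.Dict.mk t).erase st).items) t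
        = t.filter (fun e => PySem.Set.contains reach e.1 || !(ks.contains e.1)) := by
  induction ks with
  | nil => intro t; simp
  | cons k ks ih =>
    intro t
    show ks.foldl _ (if PySem.Set.contains reach k then t else ((PySem.Dict.mk t).erase k).items) = _
    by_cases hc : PySem.Set.contains reach k = true
    · rw [if_pos hc, ih]
      apply List.filter_congr
      intro e he
      by_cases hek : e.1 = k
      · rw [hek, hc]; simp
      · rw [List.contains_cons, beq_eq_false_iff_ne.mpr hek]; simp
    · have hc' : PySem.Set.contains reach k = false := by
        revert hc; cases PySem.Set.contains reach k <;> simp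
      rw [if_neg hc]
      rw [show ((PySem.Dict.mk t).erase k).items = t.filter (fun p => !(p.1 == k)) from rfl]
      rw [ih, List.filter_filter]
      apply List.filter_congr
      intro e he
      by_cases hek : e.1 = k
      · rw [hek, hc', List.contains_cons, beq_self_eq_true]; simp
      · rw [List.contains_cons, beq_eq_false_iff_ne.mpr hek]; simp

lemma pvA_prune_eq_filter (reach : PySem.Set String) (tbl : List (String × String × String)) :
    pvA_prune reach tbl = tbl.filter (fun e => PySem.Set.contains reach e.1) := by
  unfold pvA_prune
  rw [show (PySem.Dict.mk tbl).keys = tbl.map (fun e => e.1) from rfl]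
  rw [pvA_prune_gen]
  apply List.filter_congr
  intro e he
  have : (tbl.map (fun e => e.1)).contains e.1 = true := by
    simp only [List.contains_iff_mem]
    exact List.mem_map.mpr ⟨e, he, rfl⟩
  rw [this]
  simp

-- ===== VERDICT (by name: the statement is the Claim_ definition above) =====
theorem remove_unreachable_states_mealy_spec : Claim_equal_remove_unreachable_states_mealy := by
  intro T S I _hdom hpre
  obtain ⟨-, -, hnd⟩ := hpre
  unfold Spec_remove_unreachable_states_mealy
  have hiff : ∀ s, s ∈ pvA_loop T I (pvFuel T I) [PySem.List.pyGetD S 0 ""] []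
      ↔ s ∈ pvB_loop T I (pvFuel T I) [PySem.List.pyGetD S 0 ""] := fun s =>
    (pvA_reach_iff hnd s).trans (pvB_reach_iff s).symm
  have hcont : ∀ s, PySem.Set.contains (pvA_loop T I (pvFuel T I) [PySem.List.pyGetD S 0 ""] []) s
      = PySem.Set.contains (pvB_loop T I (pvFuel T I) [PySem.List.pyGetD S 0 ""]) s := by
    intro s
    apply Bool.coe_iff_coe.mp
    rw [PySem.Set.contains_iff, PySem.Set.contains_iff]
    exact hiff s
  have hA : remove_unreachable_states_mealy T S I =
      ((I.foldl (fun td sym => td.insert sym (pvA_prune (pvA_loop T I (pvFuel T I) [PySem.List.pyGetD S 0 ""] []) (td.getD sym []))) (PySem.Dict.mk T)).items,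
        S.filter (fun st => PySem.Set.contains (pvA_loop T I (pvFuel T I) [PySem.List.pyGetD S 0 ""] []) st)) := rfl
  have hB : remove_unreachable_states_mealy_alt T S I =
      ((I.foldl (fun td sym => td.insert sym ((td.getD sym []).filter (fun e => PySem.Set.contains (pvB_loop T I (pvFuel T I) [PySem.List.pyGetD S 0 ""]) e.1))) (PySem.Dict.mk T)).items,
        S.filter (fun st => PySem.Set.contains (pvB_loop T I (pvFuel T I) [PySem.List.pyGetD S 0 ""]) st)) := rfl
  rw [hA, hB]
  have h2 : S.filter (fun st => PySem.Set.contains (pvA_loop T I (pvFuel T I) [PySem.List.pyGetD S 0 ""] []) st)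
      = S.filter (fun st => PySem.Set.contains (pvB_loop T I (pvFuel T I) [PySem.List.pyGetD S 0 ""]) st) :=
    List.filter_congr (fun st _ => hcont st)
  have h1 : I.foldl (fun td sym => td.insert sym (pvA_prune (pvA_loop T I (pvFuel T I) [PySem.List.pyGetD S 0 ""] []) (td.getD sym []))) (PySem.Dict.mk T)
      = I.foldl (fun td sym => td.insert sym ((td.getD sym []).filter (fun e => PySem.Set.contains (pvB_loop T I (pvFuel T I) [PySem.List.pyGetD S 0 ""]) e.1))) (PySem.Dict.mk T) := by
    apply PySem.List.foldl_congr_mem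
    intro td sym _
    congr 1
    rw [pvA_prune_eq_filter]
    exact List.filter_congr (fun e _ => by rw [hcont e.1])
  rw [h1, h2]
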